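-- pv_equiv track=rewrite | github.com/epsilonline/service-scheduler | source/lambda/configuration/period.py | _weekdays_as_numbered_set
-- ===== SOURCE A (Python) =====
-- weekdays_names = ['mon', 'tue', 'wed', 'thu', 'fri', 'sat', 'sun']
--
-- def _weekdays_as_numbered_set(weekdays_as_string:set) -> set:
--
--     numbered_set = set()
--
--     if weekdays_as_string is None:
--         return {0, 1, 2, 3, 4, 5, 6}
--
--     for weekdays_element in weekdays_as_string:
--
--         weekdays_splitted = weekdays_element.split('-') if '-' in weekdays_element else weekdays_element.split(',')
--
--         if len(weekdays_splitted) == 1: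
--             numbered_set.add(weekdays_names.index(weekdays_splitted[0]))
--
--         elif len(weekdays_splitted) == 2:
--             start_day_idx = weekdays_names.index(weekdays_splitted[0])
--             end_day_idx = weekdays_names.index(weekdays_splitted[1])
--
--             if start_day_idx <= end_day_idx:
--                 numbered_set.update(range(start_day_idx, end_day_idx+1))
--             else:
--                 numbered_set.update(range(start_day_idx, len(weekdays_names)))
--                 numbered_set.update(range(0, end_day_idx+1))
--         elif 2 < len(weekdays_splitted) <= 7:
--             for day in weekdays_splitted:
--                 numbered_set.add(weekdays_names.index(day))
--         else:
--             raise Exception("Invalid scheduler weekdays range")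
--
--     return numbered_set
-- ===== SOURCE B (Python) =====
-- weekdays_names = ['mon', 'tue', 'wed', 'thu', 'fri', 'sat', 'sun']
--
-- _doubled_week = list(range(7)) * 2
--
-- def _expand(element):
--     """Pure helper: the list of day numbers an element denotes, in order."""
--     parts = element.split('-') if '-' in element else element.split(',')
--     if len(parts) > 7:
--         raise Exception("Invalid scheduler weekdays range")
--     if len(parts) == 2:
--         start = weekdays_names.index(parts[0])
--         end = weekdays_names.index(parts[1])
--         # circular range = contiguous slice of a doubled 0..6 table
--         return _doubled_week[start:start + (end - start) % 7 + 1]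
--     return [weekdays_names.index(p) for p in parts]
--
-- def _weekdays_as_numbered_set(weekdays_as_string: set) -> set:
--     if weekdays_as_string is None:
--         return set(range(7))
--     return set(day for element in weekdays_as_string for day in _expand(element))
-- ===== Notes on version B (the rewrite author's own statement) =====
-- stated objective: simpler
-- what changed: A's stateful loop that mutates a set accumulator through four branches (add / two range.update calls split on wrap / inner add loop) becomes a pure pipeline: a helper expands each element to its list of day numbers, with a range realized uniformly as one slice of a doubled 0..6 table (no wrap branch), and a single set() call deduplicates the flattened expansion.
import Mathlib
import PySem

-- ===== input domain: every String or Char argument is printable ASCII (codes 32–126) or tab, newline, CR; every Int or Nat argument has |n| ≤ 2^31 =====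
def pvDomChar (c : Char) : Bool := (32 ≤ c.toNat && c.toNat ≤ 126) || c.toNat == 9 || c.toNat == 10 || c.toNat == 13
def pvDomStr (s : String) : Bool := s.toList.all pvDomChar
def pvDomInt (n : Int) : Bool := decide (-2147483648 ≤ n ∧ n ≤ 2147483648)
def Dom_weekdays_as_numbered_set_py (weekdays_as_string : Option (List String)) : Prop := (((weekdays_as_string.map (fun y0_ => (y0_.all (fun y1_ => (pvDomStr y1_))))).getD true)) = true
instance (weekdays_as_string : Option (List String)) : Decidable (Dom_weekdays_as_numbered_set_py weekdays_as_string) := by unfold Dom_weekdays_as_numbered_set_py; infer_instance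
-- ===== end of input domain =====

-- ===== PORT A =====
-- B replaces A's stateful set-accumulator loop by a pure per-element expansion helper
-- (circular ranges as one slice of a doubled 0..6 table) flattened and deduplicated by one set() call
-- (objective: simpler). The input Python set is modelled as the list of its distinct elements.
def pvWeekdaysNames : List String := ["mon", "tue", "wed", "thu", "fri", "sat", "sun"]

-- weekdays_names.index(d); on Pre_ inputs the name is present (otherwise Python raises ValueError)
def pvIdx (d : String) : Int := ((PySem.List.index? pvWeekdaysNames d).getD 0 : Nat)

-- element.split('-') if '-' in element else element.split(',')
def pvParts (el : String) : List String :=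
  if PySem.Str.isIn "-" el then (PySem.Str.split? el "-").getD [] else (PySem.Str.split? el ",").getD []

def pvStepA (acc : PySem.Set Int) (el : String) : PySem.Set Int :=
  let parts := pvParts el
  if parts.length = 1 then
    PySem.Set.add acc (pvIdx (parts.getD 0 ""))
  else if parts.length = 2 then
    let s := pvIdx (parts.getD 0 "")
    let e := pvIdx (parts.getD 1 "")
    if s ≤ e then PySem.Set.update acc (PySem.List.pyRange s (e + 1) 1)
    else PySem.Set.update (PySem.Set.update acc (PySem.List.pyRange s ((pvWeekdaysNames.length : Int)) 1)) (PySem.List.pyRange 0 (e + 1) 1)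
  else if 2 < parts.length ∧ parts.length ≤ 7 then
    parts.foldl (fun a d => PySem.Set.add a (pvIdx d)) acc
  else acc  -- Python raises Exception here; excluded by Pre_

def weekdays_as_numbered_set_py (weekdays_as_string : Option (List String)) : List Int :=
  match weekdays_as_string with
  | none => [0, 1, 2, 3, 4, 5, 6]
  | some xs => xs.foldl pvStepA PySem.Set.empty

-- ===== PORT B =====
-- _doubled_week = list(range(7)) * 2
def pvDoubledWeek : List Int := PySem.List.pyRange 0 7 1 ++ PySem.List.pyRange 0 7 1

-- _expand(element): the list of day numbers an element denotes, in order
def pvExpand (el : String) : List Int :=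
  let parts := pvParts el
  if parts.length > 7 then []  -- Python raises Exception here; excluded by Pre_
  else if parts.length = 2 then
    let start := pvIdx (parts.getD 0 "")
    let stop := pvIdx (parts.getD 1 "")
    PySem.List.slice pvDoubledWeek (some start) (some (start + PySem.Int.mod (stop - start) 7 + 1))
  else parts.map pvIdx

def weekdays_as_numbered_set_py_alt (weekdays_as_string : Option (List String)) : List Int :=
  match weekdays_as_string with
  | none => PySem.List.pyRange 0 7 1
  | some xs => PySem.Set.ofList (xs.flatMap pvExpand)

-- ===== PRECONDITION & SPEC =====
-- Pre_ excludes exactly the inputs where Python A raises: an element splitting into more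
-- than 7 parts (explicit Exception), or a part that is not a weekday name (ValueError in index()).
def Pre_weekdays_as_numbered_set_py (weekdays_as_string : Option (List String)) : Prop :=
  ∀ el ∈ weekdays_as_string.getD [],
      (if PySem.Str.isIn "-" el then (PySem.Str.split? el "-").getD [] else (PySem.Str.split? el ",").getD []).length ≤ 7 ∧
      ∀ p ∈ (if PySem.Str.isIn "-" el then (PySem.Str.split? el "-").getD [] else (PySem.Str.split? el ",").getD []),
        p ∈ (["mon", "tue", "wed", "thu", "fri", "sat", "sun"] : List String)
instance (weekdays_as_string : Option (List String)) : Decidable (Pre_weekdays_as_numbered_set_py weekdays_as_string) := by unfold Pre_weekdays_as_numbered_set_py; infer_instance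

def pvWitness_weekdays_as_numbered_set_py : Option (List String) := some ["fri-tue", "wed", "mon,thu,sat"]

def Spec_weekdays_as_numbered_set_py (weekdays_as_string : Option (List String)) (out : List Int) : Prop := out = weekdays_as_numbered_set_py_alt weekdays_as_string
instance (weekdays_as_string : Option (List String)) (out : List Int) : Decidable (Spec_weekdays_as_numbered_set_py weekdays_as_string out) := by unfold Spec_weekdays_as_numbered_set_py; infer_instance

-- ===== CLAIM (what is proved, stated in full; the proofs are below) =====
def Claim_equal_weekdays_as_numbered_set_py : Prop := ∀ (weekdays_as_string : Option (List String)), Dom_weekdays_as_numbered_set_py weekdays_as_string → Pre_weekdays_as_numbered_set_py weekdays_as_string → Spec_weekdays_as_numbered_set_py weekdays_as_string (weekdays_as_numbered_set_py weekdays_as_string)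

-- ===== LEMMAS AND PROOFS =====

lemma pvIdx_bounds (d : String) (h : d ∈ (["mon", "tue", "wed", "thu", "fri", "sat", "sun"] : List String)) :
    0 ≤ pvIdx d ∧ pvIdx d < 7 := by
  fin_cases h <;> decide

-- the day list A's two-part branch pours into the set equals B's slice of the doubled week
lemma pvRange_slice_eq (s e : Int) (hs0 : 0 ≤ s) (hs : s < 7) (he0 : 0 ≤ e) (he : e < 7) :
    (if s ≤ e then PySem.List.pyRange s (e + 1) 1
     else PySem.List.pyRange s 7 1 ++ PySem.List.pyRange 0 (e + 1) 1)
    = PySem.List.slice pvDoubledWeek (some s) (some (s + PySem.Int.mod (e - s) 7 + 1)) := by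
  interval_cases s <;> interval_cases e <;> decide

-- one element's effect on the accumulator is "pour pvExpand el into the set"
lemma pvStep_eq (acc : PySem.Set Int) (el : String)
    (hlen : (pvParts el).length ≤ 7)
    (hmem : ∀ p ∈ pvParts el, p ∈ (["mon", "tue", "wed", "thu", "fri", "sat", "sun"] : List String)) :
    pvStepA acc el = (pvExpand el).foldl PySem.Set.add acc := by
  unfold pvStepA pvExpand
  match hp : pvParts el with
  | [] => simp
  | [p] => simp
  | [p, q] =>
    have hps : p ∈ (["mon", "tue", "wed", "thu", "fri", "sat", "sun"] : List String) := by
      apply hmem; rw [hp]; simp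
    have hqs : q ∈ (["mon", "tue", "wed", "thu", "fri", "sat", "sun"] : List String) := by
      apply hmem; rw [hp]; simp
    obtain ⟨hp0, hp7⟩ := pvIdx_bounds p hps
    obtain ⟨hq0, hq7⟩ := pvIdx_bounds q hqs
    have hkey := pvRange_slice_eq (pvIdx p) (pvIdx q) hp0 hp7 hq0 hq7
    simp only [List.length_cons, List.length_nil, List.getD, List.getElem?_cons_zero,
      List.getElem?_cons_succ, Option.getD_some, show pvWeekdaysNames.length = 7 from rfl]
    norm_num
    norm_num at hkey
    rw [← hkey]
    split_ifs with hle
    · rfl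
    · unfold PySem.Set.update
      exact (List.foldl_append).symm
  | p :: q :: r :: rest =>
    rw [hp] at hlen
    simp only [List.length_cons] at hlen
    dsimp only [List.length_cons]
    split_ifs with h1 h2 h2' h4 <;> first | (exfalso; omega) | rw [List.foldl_map]

-- A's interleaved set mutation over the elements equals pouring the whole flattened expansion into one set
lemma pvFold_eq (xs : List String) (acc : PySem.Set Int)
    (h : ∀ el ∈ xs, (pvParts el).length ≤ 7 ∧
      ∀ p ∈ pvParts el, p ∈ (["mon", "tue", "wed", "thu", "fri", "sat", "sun"] : List String)) :
    xs.foldl pvStepA acc = (xs.flatMap pvExpand).foldl PySem.Set.add acc := by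
  induction xs generalizing acc with
  | nil => rfl
  | cons x t ih =>
    simp only [List.flatMap_cons, List.foldl_cons, List.foldl_append]
    rw [pvStep_eq acc x (h x (by simp)).1 (h x (by simp)).2]
    exact ih _ (fun el hel => h el (by simp [hel]))

-- ===== VERDICT (by name: the statement is the Claim_ definition above) =====
theorem weekdays_as_numbered_set_py_spec : Claim_equal_weekdays_as_numbered_set_py := by
  intro w _ hpre
  unfold Spec_weekdays_as_numbered_set_py
  match w with
  | none => decide
  | some xs =>
    unfold Pre_weekdays_as_numbered_set_py at hpre
    simp only [Option.getD_some] at hpre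
    show xs.foldl pvStepA PySem.Set.empty = PySem.Set.ofList (xs.flatMap pvExpand)
    rw [PySem.Set.ofList_eq_foldl]
    exact pvFold_eq xs PySem.Set.empty hpre
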